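-- pv_equiv track=rewrite | github.com/RhyssHawk/Random-Stuff | Minecraft/Hypixel Guild Bot/Version 2/Caped Bot.py | calcDungeonLevel
-- ===== SOURCE A (Python) =====
-- dungeonProgression = [50, 125, 235, 395, 625, 955, 1425, 2095, 3045, 4385, 6275, 8940, 12700, 17960, 25340, 35640, 50040, 70040, 97640, 135640, 188140, 259640, 356640, 488640, 668640, 911640, 1239640, 1684640, 2284640, 3084640, 4149640, 5559640, 7459640, 9959640, 13259640, 17559640, 23159640, 30359640, 39559640, 51559640, 66559640, 85559640, 109559640, 139559640, 177559640, 225559640, 285559640, 360559640, 453559640, 569809640]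
--
-- def calcDungeonLevel(xp):
--     if xp >= 569809640:
--         return 50
--     level = 0
--     for i in dungeonProgression:
--         if xp >= i:
--             level += 1
--         else:
--             return level
-- ===== SOURCE B (Python) =====
-- dungeonProgression = [50, 125, 235, 395, 625, 955, 1425, 2095, 3045, 4385, 6275, 8940, 12700, 17960, 25340, 35640, 50040, 70040, 97640, 135640, 188140, 259640, 356640, 488640, 668640, 911640, 1239640, 1684640, 2284640, 3084640, 4149640, 5559640, 7459640, 9959640, 13259640, 17559640, 23159640, 30359640, 39559640, 51559640, 66559640, 85559640, 109559640, 139559640, 177559640, 225559640, 285559640, 360559640, 453559640, 569809640]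
--
-- def calcDungeonLevel(xp):
--     # binary search for the insertion point of xp (bisect_right style):
--     # the result is the number of thresholds <= xp, capped at 50.
--     lo, hi = 0, len(dungeonProgression)
--     while lo < hi:
--         mid = (lo + hi) // 2
--         if xp < dungeonProgression[mid]:
--             hi = mid
--         else:
--             lo = mid + 1
--     return lo
-- ===== Notes on version B (the rewrite author's own statement) =====
-- stated objective: alternative
-- what changed: Replaced the linear scan over the threshold list (with a separate top-of-table guard) by a hand-written bisect_right binary search that returns the insertion point directly.
import Mathlib
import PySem

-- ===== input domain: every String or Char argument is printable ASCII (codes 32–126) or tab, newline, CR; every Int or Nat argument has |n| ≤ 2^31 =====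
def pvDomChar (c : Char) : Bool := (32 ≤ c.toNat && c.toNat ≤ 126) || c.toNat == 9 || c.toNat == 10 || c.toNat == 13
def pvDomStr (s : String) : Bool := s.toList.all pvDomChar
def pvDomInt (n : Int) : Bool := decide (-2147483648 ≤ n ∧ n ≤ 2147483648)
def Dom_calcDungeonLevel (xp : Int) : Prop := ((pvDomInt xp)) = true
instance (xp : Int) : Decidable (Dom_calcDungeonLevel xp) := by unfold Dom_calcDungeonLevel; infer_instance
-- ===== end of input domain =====

-- B replaces A's linear scan over the threshold list (plus a top-level guard) by a
-- bisect_right-style binary search returning the insertion point.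

def dungeonProgression : List Int := [50, 125, 235, 395, 625, 955, 1425, 2095, 3045, 4385, 6275, 8940, 12700, 17960, 25340, 35640, 50040, 70040, 97640, 135640, 188140, 259640, 356640, 488640, 668640, 911640, 1239640, 1684640, 2284640, 3084640, 4149640, 5559640, 7459640, 9959640, 13259640, 17559640, 23159640, 30359640, 39559640, 51559640, 66559640, 85559640, 109559640, 139559640, 177559640, 225559640, 285559640, 360559640, 453559640, 569809640]

-- ===== PORT A =====
-- the for-loop with its early return; the [] case is unreachable under A's guard
def levelLoop (xp : Int) : List Int → Int → Int
  | [], level => level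
  | i :: rest, level => if xp ≥ i then levelLoop xp rest (level + 1) else level

def calcDungeonLevel (xp : Int) : Int :=
  if xp ≥ 569809640 then 50 else levelLoop xp dungeonProgression 0

-- ===== PORT B =====
-- the while-loop of Source B, recursing on hi - lo (mid = (lo + hi) // 2 inlined)
def bisectLoop (xp : Int) (lo hi : Nat) : Nat :=
  if lo < hi then
    if xp < dungeonProgression.getD ((lo + hi) / 2) 0 then
      bisectLoop xp lo ((lo + hi) / 2)
    else
      bisectLoop xp ((lo + hi) / 2 + 1) hi
  else lo
termination_by hi - lo
decreasing_by all_goals omega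

def calcDungeonLevel_alt (xp : Int) : Int :=
  (bisectLoop xp 0 dungeonProgression.length : Int)

-- ===== PRECONDITION & SPEC =====
def Spec_calcDungeonLevel (xp : Int) (out : Int) : Prop := out = calcDungeonLevel_alt xp
instance (xp : Int) (out : Int) : Decidable (Spec_calcDungeonLevel xp out) := by unfold Spec_calcDungeonLevel; infer_instance

-- ===== CLAIM (what is proved, stated in full; the proofs are below) =====
def Claim_equal_calcDungeonLevel : Prop := ∀ (xp : Int), Dom_calcDungeonLevel xp → Spec_calcDungeonLevel xp (calcDungeonLevel xp)

-- ===== LEMMAS AND PROOFS =====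

theorem dp_length : dungeonProgression.length = 50 := by decide

theorem dp_pairwise : dungeonProgression.Pairwise (· ≤ ·) := by decide

theorem dp_sortedIdx : ∀ i j : Nat, i ≤ j → j < 50 →
    dungeonProgression.getD i 0 ≤ dungeonProgression.getD j 0 := by
  intro i j hij hj
  rcases Nat.eq_or_lt_of_le hij with rfl | hlt
  · exact le_refl _
  · have hi : i < dungeonProgression.length := by rw [dp_length]; omega
    have hj' : j < dungeonProgression.length := by rw [dp_length]; omega
    rw [List.getD_eq_getElem _ _ hi, List.getD_eq_getElem _ _ hj']
    exact (List.pairwise_iff_getElem.mp dp_pairwise) i j hi hj' hlt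

theorem dp_all_le_top : ∀ a ∈ dungeonProgression, a ≤ 569809640 := by decide

-- the insertion point characterises the count of thresholds ≤ xp
theorem countP_eq_of_bounds (xp : Int) :
    ∀ (l : List Int) (k : Nat), k ≤ l.length →
    (∀ i, i < k → l.getD i 0 ≤ xp) →
    (∀ i, k ≤ i → i < l.length → xp < l.getD i 0) →
    l.countP (fun a => decide (xp ≥ a)) = k := by
  intro l
  induction l with
  | nil => intro k hk _ _; simpa using (Nat.le_zero.mp hk).symm
  | cons a rest ih =>
    intro k hk h1 h2
    cases k with
    | zero =>
      rw [List.countP_eq_zero.mpr]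
      intro x hx
      rcases List.mem_iff_getElem.mp hx with ⟨i, hi, rfl⟩
      have := h2 i (Nat.zero_le _) hi
      rw [List.getD_eq_getElem _ _ hi] at this
      simpa using this
    | succ k' =>
      have ha : a ≤ xp := by simpa using h1 0 (Nat.succ_pos _)
      have hrest := ih k' (by simpa using hk)
        (fun i hi => by simpa using h1 (i + 1) (by omega))
        (fun i hki hilen => by
          have := h2 (i + 1) (by omega) (by simpa using Nat.succ_lt_succ hilen)
          simpa using this)
      rw [List.countP_cons, hrest, if_pos (by simpa using ha)]

theorem bisect_eq_countP (xp : Int) : ∀ (n lo hi : Nat), hi - lo ≤ n → lo ≤ hi → hi ≤ 50 →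
    (∀ i, i < lo → dungeonProgression.getD i 0 ≤ xp) →
    (∀ i, hi ≤ i → i < 50 → xp < dungeonProgression.getD i 0) →
    dungeonProgression.countP (fun a => decide (xp ≥ a)) = bisectLoop xp lo hi := by
  intro n
  induction n with
  | zero =>
    intro lo hi hn hlohi hhi h1 h2
    have : lo = hi := by omega
    subst this
    rw [bisectLoop]
    simp only [lt_irrefl, if_false]
    exact countP_eq_of_bounds xp dungeonProgression lo (by rw [dp_length]; omega) h1
      (fun i hli hilen => h2 i hli (by rwa [dp_length] at hilen))
  | succ m ih =>
    intro lo hi hn hlohi hhi h1 h2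
    rw [bisectLoop]
    by_cases hlt : lo < hi
    · rw [if_pos hlt]
      have hmid1 : lo ≤ (lo + hi) / 2 := by omega
      have hmid2 : (lo + hi) / 2 < hi := by omega
      by_cases hx : xp < dungeonProgression.getD ((lo + hi) / 2) 0
      · rw [if_pos hx]
        exact ih lo ((lo + hi) / 2) (by omega) (by omega) (by omega) h1
          (fun i hmi hi50 => lt_of_lt_of_le hx (dp_sortedIdx _ i hmi hi50))
      · rw [if_neg hx]
        exact ih ((lo + hi) / 2 + 1) hi (by omega) (by omega) hhi
          (fun i hi' => le_trans (dp_sortedIdx i ((lo + hi) / 2) (by omega) (by omega))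
            (not_lt.mp hx)) h2
    · rw [if_neg hlt]
      have : lo = hi := by omega
      subst this
      exact countP_eq_of_bounds xp dungeonProgression lo (by rw [dp_length]; omega) h1
        (fun i hli hilen => h2 i hli (by rwa [dp_length] at hilen))

theorem levelLoop_eq_countP (xp : Int) :
    ∀ (l : List Int), l.Pairwise (· ≤ ·) → ∀ (acc : Int),
    levelLoop xp l acc = acc + (l.countP (fun a => decide (xp ≥ a)) : Int) := by
  intro l
  induction l with
  | nil => intro _ acc; simp [levelLoop]
  | cons a rest ih =>
    intro hp acc
    rcases List.pairwise_cons.mp hp with ⟨hall, hrest⟩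
    rw [levelLoop]
    by_cases hx : xp ≥ a
    · rw [if_pos hx, ih hrest, List.countP_cons,
        if_pos (by simpa using hx)]
      push_cast
      ring
    · rw [if_neg hx]
      rw [List.countP_eq_zero.mpr]
      · simp
      · intro x hxm
        rcases List.mem_cons.mp hxm with rfl | hxr
        · simpa using hx
        · have : a ≤ x := hall x hxr
          simp only [decide_eq_true_eq]
          omega

-- ===== VERDICT (by name: the statement is the Claim_ definition above) =====
theorem calcDungeonLevel_spec : Claim_equal_calcDungeonLevel := by
  intro xp _
  unfold Spec_calcDungeonLevel calcDungeonLevel calcDungeonLevel_alt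
  have hb : dungeonProgression.countP (fun a => decide (xp ≥ a)) =
      bisectLoop xp 0 dungeonProgression.length := by
    rw [dp_length]
    exact bisect_eq_countP xp 50 0 50 (by omega) (by omega) (by omega)
      (fun i hi => absurd hi (Nat.not_lt_zero i))
      (fun i hi h50 => absurd h50 (by omega))
  by_cases hg : xp ≥ 569809640
  · rw [if_pos hg, ← hb]
    rw [List.countP_eq_length.mpr]
    · rw [dp_length]; norm_num
    · intro a ha
      have := dp_all_le_top a ha
      simp only [decide_eq_true_eq]
      omega
  · rw [if_neg hg, levelLoop_eq_countP xp dungeonProgression dp_pairwise 0, hb]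
    simp
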